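-- pv_equiv track=rewrite | github.com/semajson/aoc2020 | day24/part1.py | convert_dirs_to_coords
-- ===== SOURCE A (Python) =====
-- def convert_dirs_to_coords(directions):
--     # Directions are relative to a base coord, call that 0,0
--     coords = [0, 0]
--
--     for direction in directions:
--         if direction == "e":
--             coords[0] += 1
--         elif direction == "w":
--             coords[0] -= 1
--         elif direction == "ne":
--             coords[1] += 1
--         elif direction == "sw":
--             coords[1] -= 1
--         elif direction == "se":
--             coords[0] += 1
--             coords[1] -= 1
--         elif direction == "nw":
--             coords[0] -= 1
--             coords[1] += 1
--     return coords
-- ===== SOURCE B (Python) =====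
-- def convert_dirs_to_coords(directions):
--     e = directions.count("e")
--     w = directions.count("w")
--     ne = directions.count("ne")
--     sw = directions.count("sw")
--     se = directions.count("se")
--     nw = directions.count("nw")
--     return [e - w + se - nw, ne - sw - se + nw]
-- ===== Notes on version B (the rewrite author's own statement) =====
-- stated objective: alternative
-- what changed: Replaces the per-element if/elif accumulation with a tabulate-then-combine shape: count each of the six tokens once, then return the coordinates as a fixed closed-form combination of the counts.
import Mathlib
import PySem

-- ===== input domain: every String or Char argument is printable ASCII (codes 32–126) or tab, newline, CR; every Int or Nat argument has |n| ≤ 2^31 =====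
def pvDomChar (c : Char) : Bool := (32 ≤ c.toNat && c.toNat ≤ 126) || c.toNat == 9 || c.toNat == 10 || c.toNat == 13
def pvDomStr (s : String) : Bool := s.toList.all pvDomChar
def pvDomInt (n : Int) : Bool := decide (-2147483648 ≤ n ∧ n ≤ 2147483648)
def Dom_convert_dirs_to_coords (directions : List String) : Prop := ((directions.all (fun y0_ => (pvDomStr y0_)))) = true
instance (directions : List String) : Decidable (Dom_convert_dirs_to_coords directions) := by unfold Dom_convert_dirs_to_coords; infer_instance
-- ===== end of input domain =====

-- B replaces A's per-element branching accumulation by six count passes and a closed-form combination (alternative decomposition, same cost).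

-- ===== PORT A =====
-- A's loop over directions mutating coords[0], coords[1]: a foldl over the pair (x, y), branches in A's order.
def pvStepA (c : Int × Int) (direction : String) : Int × Int :=
  if direction == "e" then (c.1 + 1, c.2)
  else if direction == "w" then (c.1 - 1, c.2)
  else if direction == "ne" then (c.1, c.2 + 1)
  else if direction == "sw" then (c.1, c.2 - 1)
  else if direction == "se" then (c.1 + 1, c.2 - 1)
  else if direction == "nw" then (c.1 - 1, c.2 + 1)
  else c

def convert_dirs_to_coords (directions : List String) : List Int :=
  let coords := directions.foldl pvStepA (0, 0)
  [coords.1, coords.2]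

-- ===== PORT B =====
def convert_dirs_to_coords_alt (directions : List String) : List Int :=
  let e : Int := PySem.List.count directions "e"
  let w : Int := PySem.List.count directions "w"
  let ne : Int := PySem.List.count directions "ne"
  let sw : Int := PySem.List.count directions "sw"
  let se : Int := PySem.List.count directions "se"
  let nw : Int := PySem.List.count directions "nw"
  [e - w + se - nw, ne - sw - se + nw]

-- ===== PRECONDITION & SPEC =====
def Spec_convert_dirs_to_coords (directions : List String) (out : List Int) : Prop := out = convert_dirs_to_coords_alt directions
instance (directions : List String) (out : List Int) : Decidable (Spec_convert_dirs_to_coords directions out) := by unfold Spec_convert_dirs_to_coords; infer_instance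

-- ===== CLAIM (what is proved, stated in full; the proofs are below) =====
def Claim_equal_convert_dirs_to_coords : Prop := ∀ (directions : List String), Dom_convert_dirs_to_coords directions → Spec_convert_dirs_to_coords directions (convert_dirs_to_coords directions)

-- ===== LEMMAS AND PROOFS =====
set_option maxHeartbeats 1000000 in
-- Loop invariant: A's fold from any state p adds the closed-form count combination.
theorem pv_fold_eq (l : List String) : ∀ p : Int × Int,
    l.foldl pvStepA p
    = (p.1 + (l.count "e" : Int) - l.count "w" + l.count "se" - l.count "nw",
       p.2 + (l.count "ne" : Int) - l.count "sw" - l.count "se" + l.count "nw") := by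
  induction l with
  | nil => intro p; simp
  | cons d t ih =>
    intro p
    rw [List.foldl_cons, ih]
    simp only [pvStepA, List.count_cons, eq_comm]
    push_cast
    split_ifs <;> simp_all <;> try ring
    all_goals exact ⟨trivial, trivial⟩

-- ===== VERDICT (by name: the statement is the Claim_ definition above) =====
theorem convert_dirs_to_coords_spec : Claim_equal_convert_dirs_to_coords := by
  intro directions _
  show _ = _
  simp only [convert_dirs_to_coords, convert_dirs_to_coords_alt, pv_fold_eq, PySem.List.count_eq]
  norm_num
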